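-- pv_equiv track=rewrite | github.com/yonatantzoreff-cmyk/hoh-bot-buttons | app/hoh_service.py | _parse_vcard_contact
-- ===== SOURCE A (Python) =====
-- from typing import Any, Dict, List, Optional, Tuple
--
-- def _parse_vcard_contact(vcard_text: str) -> Tuple[str, str]:
--     """Extract phone and name from a minimal vCard payload."""
--
--     phone = ""
--     name = ""
--
--     for raw_line in vcard_text.splitlines():
--         line = raw_line.strip()
--         upper_line = line.upper()
--
--         if not name:
--             if upper_line.startswith("FN:"):
--                 name = line.split(":", 1)[1].strip()
--             elif upper_line.startswith("N:"):
--                 name_parts = line.split(":", 1)[1].split(";")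
--                 name = " ".join(part for part in name_parts if part).strip()
--
--         if not phone and "TEL" in upper_line:
--             phone = line.split(":", 1)[-1].strip()
--
--         if phone and name:
--             break
--
--     return phone, name
-- ===== SOURCE B (Python) =====
-- def _name_of(line):
--     """Name value a single (stripped) vCard line yields, '' if none."""
--     upper_line = line.upper()
--     if upper_line.startswith("FN:"):
--         return line.split(":", 1)[1].strip()
--     if upper_line.startswith("N:"):
--         return " ".join(p for p in line.split(":", 1)[1].split(";") if p).strip()
--     return ""
--
-- def _phone_of(line):
--     """Phone value a single (stripped) vCard line yields, '' if none."""
--     if "TEL" in line.upper():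
--         return line.split(":", 1)[-1].strip()
--     return ""
--
-- def _parse_vcard_contact(vcard_text):
--     """Extract phone and name from a minimal vCard payload."""
--     lines = [raw.strip() for raw in vcard_text.splitlines()]
--     phone = next((v for v in map(_phone_of, lines) if v), "")
--     name = next((v for v in map(_name_of, lines) if v), "")
--     return phone, name
-- ===== Notes on version B (the rewrite author's own statement) =====
-- stated objective: simpler
-- what changed: Replaced A's single interleaved loop with mutable state and an early break by two independent first-non-empty searches, each a per-line pure extractor (_phone_of/_name_of) composed with a generic first-truthy scan.
import Mathlib
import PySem

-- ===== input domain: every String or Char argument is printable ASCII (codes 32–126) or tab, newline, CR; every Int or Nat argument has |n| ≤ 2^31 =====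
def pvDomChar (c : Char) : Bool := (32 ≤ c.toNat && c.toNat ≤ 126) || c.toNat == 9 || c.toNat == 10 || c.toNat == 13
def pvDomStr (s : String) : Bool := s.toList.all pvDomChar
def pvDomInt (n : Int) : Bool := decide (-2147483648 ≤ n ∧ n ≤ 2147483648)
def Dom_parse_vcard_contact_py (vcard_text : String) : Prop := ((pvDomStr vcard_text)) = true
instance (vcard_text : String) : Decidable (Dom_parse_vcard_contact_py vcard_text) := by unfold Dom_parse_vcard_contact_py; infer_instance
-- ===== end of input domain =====

-- B replaces A's single interleaved loop (mutable phone/name state, early break) by two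
-- independent first-non-empty searches over the stripped lines; return value only, no mutation.

-- ===== PORT A =====
-- shared per-line extraction expressions (both Pythons compute these literal expressions)
-- line.split(":", 1)[1].strip() — index 1 exists because the guarding branch ensures ':' ∈ line,
-- so the .getD "" default is never used there
def pvFN (line : String) : String :=
  PySem.Str.strip ((PySem.List.pyGet? ((PySem.Str.splitMax? line ":" 1).getD []) 1).getD "")
-- " ".join(part for part in line.split(":",1)[1].split(";") if part).strip()
def pvNjoin (line : String) : String :=
  PySem.Str.strip (PySem.Str.join " "
    (((PySem.Str.split? ((PySem.List.pyGet? ((PySem.Str.splitMax? line ":" 1).getD []) 1).getD "") ";").getD []).filter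
      (fun p => !(p == ""))))
-- line.split(":", 1)[-1].strip() — the split list is always non-empty, so .getD "" is never used
def pvTel (line : String) : String :=
  PySem.Str.strip ((PySem.List.pyGet? ((PySem.Str.splitMax? line ":" 1).getD []) (-1)).getD "")

def pvA_loop : List String → String → String → String × String
  | [], phone, name => (phone, name)
  | raw_line :: rest, phone, name =>
    let line := PySem.Str.strip raw_line
    let upper_line := PySem.Str.upper line
    let name' :=
      if name == "" then
        if PySem.Str.startswith upper_line "FN:" then pvFN line
        else if PySem.Str.startswith upper_line "N:" then pvNjoin line
        else name
      else name
    let phone' :=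
      if phone == "" && PySem.Str.isIn "TEL" upper_line then pvTel line else phone
    if !(phone' == "") && !(name' == "") then (phone', name')
    else pvA_loop rest phone' name'

def parse_vcard_contact_py (vcard_text : String) : String × String :=
  pvA_loop (PySem.Str.splitlines vcard_text) "" ""

-- ===== PORT B =====
def pvNameOf (line : String) : String :=
  let upper_line := PySem.Str.upper line
  if PySem.Str.startswith upper_line "FN:" then pvFN line
  else if PySem.Str.startswith upper_line "N:" then pvNjoin line
  else ""

def pvPhoneOf (line : String) : String :=
  if PySem.Str.isIn "TEL" (PySem.Str.upper line) then pvTel line else ""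

-- next((v for v in map(f, lines) if v), "")
def pvFirstTruthy (f : String → String) : List String → String
  | [] => ""
  | l :: rest => let v := f l; if v == "" then pvFirstTruthy f rest else v

def parse_vcard_contact_py_alt (vcard_text : String) : String × String :=
  let lines := (PySem.Str.splitlines vcard_text).map PySem.Str.strip
  (pvFirstTruthy pvPhoneOf lines, pvFirstTruthy pvNameOf lines)

-- ===== PRECONDITION & SPEC =====
def Spec_parse_vcard_contact_py (vcard_text : String) (out : String × String) : Prop := out = parse_vcard_contact_py_alt vcard_text
instance (vcard_text : String) (out : String × String) : Decidable (Spec_parse_vcard_contact_py vcard_text out) := by unfold Spec_parse_vcard_contact_py; infer_instance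

-- ===== CLAIM (what is proved, stated in full; the proofs are below) =====
def Claim_equal_parse_vcard_contact_py : Prop := ∀ (vcard_text : String), Dom_parse_vcard_contact_py vcard_text → Spec_parse_vcard_contact_py vcard_text (parse_vcard_contact_py vcard_text)

-- ===== LEMMAS AND PROOFS =====

-- loop invariant: A's loop returns, for each field, the held value if already truthy,
-- otherwise the first truthy per-line extraction over the remaining (stripped) lines.
theorem pvA_loop_eq (lines : List String) (phone name : String) :
    pvA_loop lines phone name =
      ((if phone == "" then pvFirstTruthy pvPhoneOf (lines.map PySem.Str.strip) else phone),
       (if name == "" then pvFirstTruthy pvNameOf (lines.map PySem.Str.strip) else name)) := by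
  induction lines generalizing phone name with
  | nil =>
    simp only [pvA_loop, List.map_nil, pvFirstTruthy]
    by_cases hp : phone = "" <;> by_cases hn : name = "" <;> simp [hp, hn]
  | cons raw rest ih =>
    simp only [pvA_loop, List.map_cons, pvFirstTruthy]
    set line := PySem.Str.strip raw with hline
    have hname : (if name == "" then
        if PySem.Str.startswith (PySem.Str.upper line) "FN:" then pvFN line
        else if PySem.Str.startswith (PySem.Str.upper line) "N:" then pvNjoin line
        else name
      else name) = (if name == "" then pvNameOf line else name) := by
      by_cases h : name = "" <;> simp [h, pvNameOf]
    have hphone : (if phone == "" && PySem.Str.isIn "TEL" (PySem.Str.upper line) then pvTel line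
        else phone) = (if phone == "" then pvPhoneOf line else phone) := by
      by_cases h : phone = "" <;> simp [h, pvPhoneOf]
    rw [hname, hphone]
    by_cases hp : phone = "" <;> by_cases hn : name = "" <;>
      by_cases hpv : pvPhoneOf line = "" <;> by_cases hnv : pvNameOf line = "" <;>
        simp [hp, hn, hpv, hnv, ih]

-- ===== VERDICT (by name: the statement is the Claim_ definition above) =====
theorem parse_vcard_contact_py_spec : Claim_equal_parse_vcard_contact_py := by
  intro vcard_text _
  show _ = _
  rw [parse_vcard_contact_py, parse_vcard_contact_py_alt, pvA_loop_eq]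
  simp
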